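-- pv_equiv track=rewrite | github.com/omdaelsfa7/Theory-Projects | 1/regex.py | add_explicit_concat
-- ===== SOURCE A (Python) =====
-- def add_explicit_concat(regex):
--     """
--     Insert explicit concatenation operator '.' between tokens where needed.
--     E.g., "ab" -> "a.b", "a*b" -> "a*.b", "(a)(b)" -> "(a).(b)"
--     """
--     result = []
--     operators = set('|*+')
--     length = len(regex)
--
--     for i, char in enumerate(regex):
--         result.append(char)
--         if i + 1 < length:
--             curr = char
--             nxt = regex[i + 1]
--
--             # Add concat if:
--             # curr is not '(' and not '|'
--             # next is not ')' and not '|' and not '*' and not '+'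
--             curr_is_left = (curr not in ('(', '|'))
--             nxt_is_right = (nxt not in (')', '|', '*', '+'))
--
--             if curr_is_left and nxt_is_right:
--                 result.append('.')
--
--     return ''.join(result)
-- ===== SOURCE B (Python) =====
-- def add_explicit_concat(regex):
--     """
--     Insert explicit concatenation operator '.' between tokens where needed.
--     Staged algorithm: first compute the list of cut positions (the gaps that
--     need a concat operator), then slice the regex at those cuts and join the
--     segments with the concat operator as separator.
--     """
--     n = len(regex)
--     cuts = [i for i in range(1, n)
--             if regex[i - 1] not in "(|" and regex[i] not in ")|*+"]
--     bounds = [0] + cuts + [n]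
--     return ".".join(regex[a:b] for a, b in zip(bounds, bounds[1:]))
-- ===== Notes on version B (the rewrite author's own statement) =====
-- stated objective: alternative
-- what changed: Replaces A's single emit-as-you-go loop (append each char, conditionally append the concat operator) by a staged algorithm: first compute the list of cut positions that need a concat operator, then slice the regex at those cuts and join the segments with the concat operator as separator.
import Mathlib
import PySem

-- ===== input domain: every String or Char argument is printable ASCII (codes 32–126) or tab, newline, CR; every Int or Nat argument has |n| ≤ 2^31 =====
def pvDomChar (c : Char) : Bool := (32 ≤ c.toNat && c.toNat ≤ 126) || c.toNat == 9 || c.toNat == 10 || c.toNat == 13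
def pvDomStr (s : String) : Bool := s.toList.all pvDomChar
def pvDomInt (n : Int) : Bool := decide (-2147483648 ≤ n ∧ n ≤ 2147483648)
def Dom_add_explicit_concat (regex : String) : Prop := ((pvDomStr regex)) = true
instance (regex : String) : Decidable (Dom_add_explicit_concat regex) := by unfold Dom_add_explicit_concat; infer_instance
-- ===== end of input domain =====

-- B replaces A's single emit-as-you-go loop by a staged algorithm: compute the
-- cut positions that need a concat operator, slice the regex there, and join
-- the segments with the concat operator; objective: alternative, same O(n) cost.

-- ===== PORT A =====
-- literal port of A: foldl over enumerate(regex), appending char and conditionally '.'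
def add_explicit_concat (regex : String) : String :=
  let cs := regex.toList
  let length : Int := cs.length
  let result : List Char :=
    (PySem.List.enumerate cs 0).foldl
      (fun result p =>
        let i := p.1
        let char := p.2
        let result := result ++ [char]
        if i + 1 < length then
          let curr := char
          let nxt := PySem.List.pyGetD cs (i + 1) ' '  -- regex[i+1]; in range under the guard
          let curr_is_left := curr ≠ '(' ∧ curr ≠ '|'
          let nxt_is_right := nxt ≠ ')' ∧ nxt ≠ '|' ∧ nxt ≠ '*' ∧ nxt ≠ '+'
          if curr_is_left ∧ nxt_is_right then result ++ ['.'] else result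
        else result)
      []
  String.mk result

-- ===== PORT B =====
-- literal port of B: cut positions via a filtered range, slices between
-- consecutive bounds, joined with '.' (string slicing/joining done on toList)
def add_explicit_concat_alt (regex : String) : String :=
  let cs := regex.toList
  let n : Int := cs.length
  let cuts : List Int :=
    (PySem.List.pyRange 1 n 1).filter
      (fun i => decide ((PySem.List.pyGetD cs (i - 1) ' ' ≠ '(' ∧ PySem.List.pyGetD cs (i - 1) ' ' ≠ '|') ∧
                        (PySem.List.pyGetD cs i ' ' ≠ ')' ∧ PySem.List.pyGetD cs i ' ' ≠ '|' ∧
                         PySem.List.pyGetD cs i ' ' ≠ '*' ∧ PySem.List.pyGetD cs i ' ' ≠ '+')))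
  let bounds : List Int := 0 :: cuts ++ [n]
  String.mk (PySem.Chars.join ['.']
    ((bounds.zip bounds.tail).map (fun p => PySem.List.slice cs (some p.1) (some p.2))))

-- ===== PRECONDITION & SPEC =====
def Spec_add_explicit_concat (regex : String) (out : String) : Prop := out = add_explicit_concat_alt regex
instance (regex : String) (out : String) : Decidable (Spec_add_explicit_concat regex out) := by unfold Spec_add_explicit_concat; infer_instance

-- ===== CLAIM (what is proved, stated in full; the proofs are below) =====
def Claim_equal_add_explicit_concat : Prop := ∀ (regex : String), Dom_add_explicit_concat regex → Spec_add_explicit_concat regex (add_explicit_concat regex)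

-- ===== LEMMAS AND PROOFS =====

-- the needs-concat test shared by both proofs' reference form
def pvNeedsDot (c n : Char) : Bool :=
  decide ((c ≠ '(' ∧ c ≠ '|') ∧ (n ≠ ')' ∧ n ≠ '|' ∧ n ≠ '*' ∧ n ≠ '+'))

-- reference pairwise form both ports are reduced to
def pvPairs : List Char → List Char
  | [] => []
  | [c] => [c]
  | c :: n :: t => c :: ((if pvNeedsDot c n then ['.'] else []) ++ pvPairs (n :: t))

-- B's filter predicate, named
def pvD (cs : List Char) (i : Int) : Bool :=
  decide ((PySem.List.pyGetD cs (i - 1) ' ' ≠ '(' ∧ PySem.List.pyGetD cs (i - 1) ' ' ≠ '|') ∧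
          (PySem.List.pyGetD cs i ' ' ≠ ')' ∧ PySem.List.pyGetD cs i ' ' ≠ '|' ∧
           PySem.List.pyGetD cs i ' ' ≠ '*' ∧ PySem.List.pyGetD cs i ' ' ≠ '+'))

-- dotted tail of the output from position a on
def pvT (cs : List Char) (a : Int) : List Char :=
  (PySem.List.pyRange a cs.length 1).flatMap
    (fun i => (if pvD cs i then ['.'] else []) ++ [PySem.List.pyGetD cs i ' '])

def pvPieces (cs : List Char) (bs : List Int) : List (List Char) :=
  (bs.zip bs.tail).map (fun p => PySem.List.slice cs (some p.1) (some p.2))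

lemma A_fold_eq (cs : List Char) : ∀ (l : List Char) (i : Nat) (acc : List Char),
    l = cs.drop i →
    (PySem.List.enumerate l (i : Int)).foldl
      (fun result p =>
        if p.1 + 1 < (cs.length : Int) then
          if (p.2 ≠ '(' ∧ p.2 ≠ '|') ∧
             (PySem.List.pyGetD cs (p.1 + 1) ' ' ≠ ')' ∧ PySem.List.pyGetD cs (p.1 + 1) ' ' ≠ '|' ∧
              PySem.List.pyGetD cs (p.1 + 1) ' ' ≠ '*' ∧ PySem.List.pyGetD cs (p.1 + 1) ' ' ≠ '+')
          then result ++ [p.2] ++ ['.'] else result ++ [p.2]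
        else result ++ [p.2])
      acc = acc ++ pvPairs l := by
  intro l
  induction l with
  | nil => intro i acc _; simp [PySem.List.enumerate_nil, pvPairs]
  | cons c rest ih =>
    intro i acc hdrop
    have hle : i ≤ cs.length := by
      by_cases hle : i ≤ cs.length
      · exact hle
      · rw [List.drop_eq_nil_of_le (by omega : cs.length ≤ i)] at hdrop
        exact absurd hdrop (List.cons_ne_nil c rest)
    have hlen : cs.length = i + rest.length + 1 := by
      have h1 : (c :: rest).length = cs.length - i := by
        rw [hdrop]; exact List.length_drop
      simp at h1
      omega
    have hdrop' : rest = cs.drop (i + 1) := by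
      rw [← List.tail_drop, ← hdrop]
      rfl
    rw [PySem.List.enumerate_cons, List.foldl_cons]
    cases rest with
    | nil =>
      have hguard : ¬ ((i : Int) + 1 < (cs.length : Int)) := by
        simp at hlen
        omega
      simp only [hguard, if_false]
      have := ih (i + 1) (acc ++ [c]) hdrop'
      simp only [Nat.cast_add, Nat.cast_one] at this ⊢
      rw [this]
      simp [pvPairs]
    | cons n t =>
      have hguard : ((i : Int) + 1 < (cs.length : Int)) := by
        simp at hlen
        omega
      have hn : PySem.List.pyGetD cs ((i : Int) + 1) ' ' = n := by
        have hcast : ((i : Int) + 1) = ((i + 1 : Nat) : Int) := by push_cast; ring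
        rw [hcast, PySem.List.pyGetD_natCast, List.getD_eq_getElem?_getD]
        have hg : cs[(i+1)]? = some n := by
          have : (cs.drop (i+1))[0]? = cs[(i+1)+0]? := List.getElem?_drop ..
          rw [← hdrop'] at this
          simpa using this.symm
        rw [hg]
        rfl
      simp only [hguard, if_true, hn]
      by_cases hc : (c ≠ '(' ∧ c ≠ '|') ∧ (n ≠ ')' ∧ n ≠ '|' ∧ n ≠ '*' ∧ n ≠ '+')
      · rw [if_pos hc]
        have := ih (i + 1) (acc ++ [c] ++ ['.']) hdrop'
        simp only [Nat.cast_add, Nat.cast_one] at this ⊢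
        rw [this]
        simp [pvPairs, pvNeedsDot, hc]
      · rw [if_neg hc]
        have := ih (i + 1) (acc ++ [c]) hdrop'
        simp only [Nat.cast_add, Nat.cast_one] at this ⊢
        rw [this]
        simp [pvPairs, pvNeedsDot, hc]

lemma slice_snoc (cs : List Char) (j a : Int) (h0 : 0 ≤ j) (hja : j ≤ a) (han : a < (cs.length : Int)) :
    PySem.List.slice cs (some j) (some (a + 1)) =
      PySem.List.slice cs (some j) (some a) ++ [PySem.List.pyGetD cs a ' '] := by
  rw [PySem.List.slice_toNat _ h0 (by omega), PySem.List.slice_toNat _ h0 (by omega),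
      PySem.List.pyGetD_eq_getElem cs ' ' (by omega) han]
  have h1 : (a + 1).toNat - j.toNat = (a.toNat - j.toNat) + 1 := by omega
  rw [h1, List.take_add_one]
  have h2 : (cs.drop j.toNat)[a.toNat - j.toNat]? = some cs[a.toNat] := by
    rw [List.getElem?_drop]
    have h3 : j.toNat + (a.toNat - j.toNat) = a.toNat := by omega
    rw [h3, List.getElem?_eq_getElem (by omega)]
  rw [h2]
  rfl

lemma slice_refl (cs : List Char) (a : Int) (h0 : 0 ≤ a) :
    PySem.List.slice cs (some a) (some a) = [] := by
  rw [PySem.List.slice_toNat _ h0 h0]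
  simp

lemma join_cons_ne (x : List Char) (ys : List (List Char)) (h : ys ≠ []) :
    PySem.Chars.join ['.'] (x :: ys) = x ++ '.' :: PySem.Chars.join ['.'] ys := by
  cases ys with
  | nil => exact absurd rfl h
  | cons y t => rw [PySem.Chars.join_cons_cons]; simp

lemma B_join (cs : List Char) : ∀ (k : Nat) (a j : Int), a = (cs.length : Int) - k → 1 ≤ a → 0 ≤ j → j ≤ a →
    PySem.Chars.join ['.'] (pvPieces cs (j :: (PySem.List.pyRange a cs.length 1).filter (pvD cs) ++ [(cs.length : Int)]))
      = PySem.List.slice cs (some j) (some a) ++ pvT cs a := by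
  intro k
  induction k with
  | zero =>
    intro a j ha h1 h0 hja
    have han : a = (cs.length : Int) := by omega
    subst han
    rw [PySem.List.pyRange_one_eq_nil le_rfl]
    simp only [List.filter_nil]
    rw [pvT, PySem.List.pyRange_one_eq_nil le_rfl]
    simp [pvPieces, PySem.Chars.join_singleton]
  | succ k ih =>
    intro a j ha h1 h0 hja
    have han : a < (cs.length : Int) := by omega
    rw [PySem.List.pyRange_one_cons han, List.filter_cons]
    have hT : pvT cs a = (if pvD cs a then ['.'] else []) ++ [PySem.List.pyGetD cs a ' '] ++ pvT cs (a + 1) := by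
      rw [pvT, PySem.List.pyRange_one_cons han, List.flatMap_cons, pvT]
    by_cases hd : pvD cs a
    · rw [if_pos hd]
      have hpieces : pvPieces cs (j :: a :: (PySem.List.pyRange (a+1) cs.length 1).filter (pvD cs) ++ [(cs.length : Int)])
          = PySem.List.slice cs (some j) (some a)
            :: pvPieces cs (a :: (PySem.List.pyRange (a+1) cs.length 1).filter (pvD cs) ++ [(cs.length : Int)]) := by
        simp [pvPieces]
      rw [hpieces, join_cons_ne]
      · rw [ih (a+1) a (by omega) (by omega) (by omega) (by omega),
            slice_snoc cs a a (by omega) le_rfl han, slice_refl cs a (by omega), hT]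
        simp [hd]
      · cases hfl : (PySem.List.pyRange (a+1) cs.length 1).filter (pvD cs) with
        | nil => simp [pvPieces]
        | cons z t => simp [pvPieces]
    · rw [if_neg hd]
      rw [ih (a+1) j (by omega) (by omega) h0 (by omega), hT]
      rw [slice_snoc cs j a h0 hja han]
      simp [hd]

lemma getD_of_drop (cs : List Char) (a : Nat) (c : Char) (t : List Char)
    (h : cs.drop a = c :: t) : PySem.List.pyGetD cs ((a : Int)) ' ' = c := by
  rw [PySem.List.pyGetD_natCast, List.getD_eq_getElem?_getD]
  have hg : cs[a]? = some c := by
    have h0 : (cs.drop a)[0]? = cs[a+0]? := List.getElem?_drop ..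
    rw [h] at h0
    simpa using h0.symm
  rw [hg]
  rfl

lemma pairs_T (cs : List Char) : ∀ (l : List Char) (a : Nat), 1 ≤ a → l = cs.drop (a - 1) → l ≠ [] →
    pvPairs l = PySem.List.pyGetD cs ((a : Int) - 1) ' ' :: pvT cs a := by
  intro l
  induction l with
  | nil => intro a _ _ h; exact absurd rfl h
  | cons c rest ih =>
    intro a ha hdrop _
    have hcast : ((a : Int) - 1) = (((a - 1 : Nat)) : Int) := by omega
    have hc : PySem.List.pyGetD cs ((a : Int) - 1) ' ' = c := by
      rw [hcast]; exact getD_of_drop cs (a-1) c rest hdrop.symm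
    have hlen : cs.length = (a - 1) + rest.length + 1 := by
      have h1 : (c :: rest).length = cs.length - (a-1) := by
        rw [hdrop]; exact List.length_drop
      have h2 : a - 1 ≤ cs.length := by
        by_cases hle : a - 1 ≤ cs.length
        · exact hle
        · rw [List.drop_eq_nil_of_le (by omega : cs.length ≤ a - 1)] at hdrop
          exact absurd hdrop (List.cons_ne_nil c rest)
      simp at h1
      omega
    have hdrop' : rest = cs.drop a := by
      have h3 : rest = (cs.drop (a-1)).tail := by rw [← hdrop]; rfl
      rw [h3, List.tail_drop]
      congr 1
      omega
    cases rest with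
    | nil =>
      have hn : ((cs.length : Int)) ≤ (a : Int) := by
        simp at hlen
        omega
      rw [pvT, PySem.List.pyRange_one_eq_nil hn]
      simp [pvPairs, hc]
    | cons m t =>
      have hlen' : cs.length = a + t.length + 1 := by
        simp at hlen
        omega
      have han : (a : Int) < cs.length := by
        have h4 : a + 1 ≤ cs.length := by omega
        exact_mod_cast h4
      have hm : PySem.List.pyGetD cs ((a : Int)) ' ' = m := getD_of_drop cs a m t hdrop'.symm
      have hih := ih (a + 1) (by omega) (by simpa using hdrop') (List.cons_ne_nil m t)
      have hsimp : ((a + 1 : Nat) : Int) - 1 = (a : Int) := by push_cast; ring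
      rw [hsimp] at hih
      have hT : pvT cs a = (if pvD cs a then ['.'] else []) ++ [PySem.List.pyGetD cs (a : Int) ' '] ++ pvT cs ((a : Int) + 1) := by
        rw [pvT, PySem.List.pyRange_one_cons han, List.flatMap_cons, pvT]
      have hcast2 : ((a + 1 : Nat) : Int) = (a : Int) + 1 := by push_cast; ring
      rw [hcast2] at hih
      by_cases hnd : (c ≠ '(' ∧ c ≠ '|') ∧ (m ≠ ')' ∧ m ≠ '|' ∧ m ≠ '*' ∧ m ≠ '+')
      · have hD : pvD cs (a : Int) = true := by
          simp only [pvD, hc, hm, decide_eq_true_eq]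
          exact hnd
        simp [pvPairs, pvNeedsDot, hnd, hc, hT, hD, hm, hih]
      · have hD : pvD cs (a : Int) = false := by
          simp only [pvD, hc, hm, decide_eq_false_iff_not]
          exact hnd
        simp [pvPairs, pvNeedsDot, hnd, hc, hT, hD, hm, hih]

lemma B_alt_eq (regex : String) : add_explicit_concat_alt regex = String.mk (pvPairs regex.toList) := by
  unfold add_explicit_concat_alt
  simp only []
  have hB : ∀ (bs : List Int),
      (bs.zip bs.tail).map (fun p => PySem.List.slice regex.toList (some p.1) (some p.2))
        = pvPieces regex.toList bs := fun _ => rfl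
  rw [hB]
  by_cases hnil : regex.toList = []
  · rw [hnil]
    rw [show ((([] : List Char).length : Int)) = (0 : Int) by simp,
        PySem.List.pyRange_one_eq_nil (by omega : (0:Int) ≤ 1)]
    simp [pvPieces, pvPairs, PySem.Chars.join_singleton, PySem.List.slice_toNat]
  · have h1 : 1 ≤ regex.toList.length := List.length_pos_of_ne_nil hnil
    have hfil : (PySem.List.pyRange 1 (regex.toList.length : Int) 1).filter
        (fun i => decide ((PySem.List.pyGetD regex.toList (i - 1) ' ' ≠ '(' ∧ PySem.List.pyGetD regex.toList (i - 1) ' ' ≠ '|') ∧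
                          (PySem.List.pyGetD regex.toList i ' ' ≠ ')' ∧ PySem.List.pyGetD regex.toList i ' ' ≠ '|' ∧
                           PySem.List.pyGetD regex.toList i ' ' ≠ '*' ∧ PySem.List.pyGetD regex.toList i ' ' ≠ '+')))
        = (PySem.List.pyRange 1 (regex.toList.length : Int) 1).filter (pvD regex.toList) := rfl
    rw [hfil,
        B_join regex.toList (regex.toList.length - 1) 1 0 (by omega) le_rfl le_rfl (by omega)]
    rw [pairs_T regex.toList regex.toList 1 le_rfl (by simp) hnil]
    congr 1
    rw [PySem.List.slice_toNat _ (by omega) (by omega)]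
    cases hcs : regex.toList with
    | nil => exact absurd hcs hnil
    | cons c t => simp [PySem.List.pyGetD_zero_cons]

-- ===== VERDICT (by name: the statement is the Claim_ definition above) =====
theorem add_explicit_concat_spec : Claim_equal_add_explicit_concat := by
  intro regex _
  unfold Spec_add_explicit_concat add_explicit_concat
  simp only []
  have hA := A_fold_eq regex.toList regex.toList 0 [] (by simp)
  simp only [Nat.cast_zero] at hA
  rw [hA, B_alt_eq regex]
  simp
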